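-- pv_equiv track=rewrite | github.com/OptionalKarl/Aoc2023 | Scripts/day10.py | dotsbetweenpairs
-- ===== SOURCE A (Python) =====
-- def dotsbetweenpairs(array):
--     dot_count = 0
--     pair_started = False
--
--     for char in array:
--         if char == "P":
--             pair_started = not pair_started
--         if char == "." and pair_started:
--             dot_count += 1
--
--     return dot_count
--
--
--     return sum(dot_counts)
-- ===== SOURCE B (Python) =====
-- def dotsbetweenpairs(array):
--     # Two-pass decomposition: split the input into segments at each "P",
--     # then count dots in the odd-indexed segments (the regions between
--     # the 1st/2nd, 3rd/4th, ... P; a trailing lone P opens a region to the end).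
--     segs = []
--     cur = []
--     for c in array:
--         if c == "P":
--             segs.append(cur)
--             cur = []
--         else:
--             cur.append(c)
--     segs.append(cur)
--     total = 0
--     for i, seg in enumerate(segs):
--         if i % 2 == 1:
--             total += seg.count(".")
--     return total
-- ===== Notes on version B (the rewrite author's own statement) =====
-- stated objective: alternative
-- what changed: Replaces the running boolean toggle with a two-pass decomposition: first split the input into segments at each 'P', then sum the dot counts of the odd-indexed segments.
import Mathlib
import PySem

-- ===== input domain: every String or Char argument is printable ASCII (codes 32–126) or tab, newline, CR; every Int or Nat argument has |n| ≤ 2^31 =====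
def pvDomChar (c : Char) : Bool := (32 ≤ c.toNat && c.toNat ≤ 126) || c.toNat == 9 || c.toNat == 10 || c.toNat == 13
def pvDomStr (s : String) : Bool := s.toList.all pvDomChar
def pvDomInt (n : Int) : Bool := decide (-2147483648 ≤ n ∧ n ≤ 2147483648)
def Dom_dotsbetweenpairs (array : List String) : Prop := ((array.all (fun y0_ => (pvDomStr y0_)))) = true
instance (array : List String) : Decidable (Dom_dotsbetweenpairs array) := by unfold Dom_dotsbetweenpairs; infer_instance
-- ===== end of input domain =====

-- B replaces A's running boolean toggle with a two-pass decomposition (split into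
-- segments at each "P", then sum dot counts of odd-indexed segments); alternative, same cost.


-- ===== PORT A =====
-- the loop body: maybe toggle pair_started, then maybe count the dot
def pvAStep (s : Int × Bool) (c : String) : Int × Bool :=
  let s1 := if c = "P" then (s.1, !s.2) else s
  if c = "." ∧ s1.2 = true then (s1.1 + 1, s1.2) else s1

def dotsbetweenpairs (array : List String) : Int :=
  (array.foldl pvAStep (0, false)).1

-- ===== PORT B =====
-- first pass: split into segments at each "P"
def pvBSeg (st : List (List String) × List String) (c : String) :
    List (List String) × List String :=
  if c = "P" then (st.1 ++ [st.2], []) else (st.1, st.2 ++ [c])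

def dotsbetweenpairs_alt (array : List String) : Int :=
  let st := array.foldl pvBSeg ([], [])
  let segs := st.1 ++ [st.2]
  -- second pass: sum dot counts of odd-indexed segments
  (PySem.List.enumerate segs).foldl
    (fun acc p => if p.1 % 2 = 1 then acc + (PySem.List.count p.2 "." : Int) else acc) 0

-- ===== PRECONDITION & SPEC =====
def Spec_dotsbetweenpairs (array : List String) (out : Int) : Prop := out = dotsbetweenpairs_alt array
instance (array : List String) (out : Int) : Decidable (Spec_dotsbetweenpairs array out) := by unfold Spec_dotsbetweenpairs; infer_instance

-- ===== CLAIM (what is proved, stated in full; the proofs are below) =====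
def Claim_equal_dotsbetweenpairs : Prop := ∀ (array : List String), Dom_dotsbetweenpairs array → Spec_dotsbetweenpairs array (dotsbetweenpairs array)

-- ===== LEMMAS AND PROOFS =====

/-- Reference count: dots seen while the toggle (after processing each char) is on. -/
def pvSpec : Bool → List String → Int
  | _, [] => 0
  | b, c :: rest =>
    let b' := if c = "P" then !b else b
    (if c = "." ∧ b' = true then 1 else 0) + pvSpec b' rest

theorem pvA_foldl (xs : List String) : ∀ (n : Int) (b : Bool),
    (xs.foldl pvAStep (n, b)).1 = n + pvSpec b xs := by
  induction xs with
  | nil => intro n b; simp [pvSpec]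
  | cons c rest ih =>
    intro n b
    by_cases hP : c = "P"
    · simp [List.foldl_cons, pvSpec, pvAStep, hP, ih]
    · by_cases hd : c = "." <;> by_cases hb : b <;>
        simp [List.foldl_cons, pvSpec, pvAStep, hP, hd, hb, ih] <;> ring

theorem pvB_prefix (xs : List String) : ∀ (segs : List (List String)) (cur : List String),
    xs.foldl pvBSeg (segs, cur) =
      (segs ++ (xs.foldl pvBSeg ([], cur)).1, (xs.foldl pvBSeg ([], cur)).2) := by
  induction xs with
  | nil => intro segs cur; simp
  | cons c rest ih =>
    intro segs cur
    simp only [List.foldl_cons]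
    by_cases hP : c = "P"
    · simp only [pvBSeg, hP, if_true, List.nil_append]
      rw [ih (segs ++ [cur]) [], ih [cur] []]
      simp
    · simp only [pvBSeg, if_neg hP]
      exact ih segs (cur ++ [c])

/-- Sum of dot counts of the segments at "inside" positions, `b` = first segment is inside. -/
def pvRegSum : Bool → List (List String) → Int
  | _, [] => 0
  | b, s :: r => (if b then (PySem.List.count s "." : Int) else 0) + pvRegSum (!b) r

theorem pvB_segs (xs : List String) : ∀ (cur : List String) (b : Bool),
    pvRegSum b ((xs.foldl pvBSeg ([], cur)).1 ++ [(xs.foldl pvBSeg ([], cur)).2]) =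
      (if b then (PySem.List.count cur "." : Int) else 0) + pvSpec b xs := by
  induction xs with
  | nil => intro cur b; simp [pvRegSum, pvSpec]
  | cons c rest ih =>
    intro cur b
    simp only [List.foldl_cons]
    by_cases hP : c = "P"
    · simp only [pvBSeg, pvSpec, hP, if_true, List.nil_append]
      rw [pvB_prefix rest [cur]]
      simp only [List.cons_append, List.nil_append, pvRegSum]
      rw [ih [] (!b)]
      simp [PySem.List.count]
    · simp only [pvBSeg, pvSpec, if_neg hP]
      rw [ih (cur ++ [c]) b]
      have hcnt : (PySem.List.count (cur ++ [c]) "." : Int) =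
          (PySem.List.count cur "." : Int) + (if c = "." then 1 else 0) := by
        simp [PySem.List.count, List.count_append]
        split_ifs with h <;> simp [h, List.count_singleton] <;> simp [List.count_eq_zero, h]
      have hD : (if c = "." ∧ b = true then (1:Int) else 0) =
          if b then (if c = "." then 1 else 0) else 0 := by
        by_cases hb : b <;> by_cases hd : c = "." <;> simp [hb, hd]
      rw [hcnt, hD]
      by_cases hb : b <;> simp [hb] <;> ring

theorem pvEnum_sum (ls : List (List String)) : ∀ (k acc : Int),
    (PySem.List.enumerate ls k).foldl
        (fun acc p => if p.1 % 2 = 1 then acc + (PySem.List.count p.2 "." : Int) else acc) acc =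
      acc + pvRegSum (decide (k % 2 = 1)) ls := by
  induction ls with
  | nil => intro k acc; simp [PySem.List.enumerate, pvRegSum]
  | cons s r ih =>
    intro k acc
    simp only [PySem.List.enumerate, List.foldl_cons, pvRegSum]
    rw [ih (k + 1)]
    have hpar : decide ((k + 1) % 2 = 1) = !decide (k % 2 = 1) := by
      by_cases h : k % 2 = 1 <;> simp [h] <;> omega
    rw [hpar]
    by_cases h : k % 2 = 1 <;> simp [h] <;> ring

-- ===== VERDICT (by name: the statement is the Claim_ definition above) =====
theorem dotsbetweenpairs_spec : Claim_equal_dotsbetweenpairs := by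
  intro array _
  unfold Spec_dotsbetweenpairs dotsbetweenpairs dotsbetweenpairs_alt
  rw [pvA_foldl array 0 false, pvEnum_sum _ 0 0]
  have := pvB_segs array [] false
  simp only [if_neg (Bool.false_ne_true)] at this ⊢
  simpa using this.symm
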